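-- pv_equiv track=rewrite | github.com/parshwa1999/PeR-ViS | Results/task_1/eval.py | GetCMC
-- ===== SOURCE A (Python) =====
-- def GetCMC(rank):
-- 	cmc = []
-- 	for i in range(len(rank)):
-- 		count = 0
-- 		for j in range(len(rank)):
-- 			if (rank[j] <= (i +1)):
-- 				count = count + 1
--
-- 		cmc.append(count)
--
-- 	return cmc
-- ===== SOURCE B (Python) =====
-- def GetCMC(rank):
--     s = sorted(rank)
--     n = len(rank)
--     cmc = []
--     p = 0
--     for t in range(1, n + 1):
--         while p < n and s[p] <= t:
--             p += 1
--         cmc.append(p)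
--     return cmc
-- ===== Notes on version B (the rewrite author's own statement) =====
-- stated objective: faster
-- what changed: Replaces the quadratic nested count loop by sorting the ranks once and sweeping a single pointer across the sorted list while the threshold grows, so each answer is the current pointer position.
import Mathlib
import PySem

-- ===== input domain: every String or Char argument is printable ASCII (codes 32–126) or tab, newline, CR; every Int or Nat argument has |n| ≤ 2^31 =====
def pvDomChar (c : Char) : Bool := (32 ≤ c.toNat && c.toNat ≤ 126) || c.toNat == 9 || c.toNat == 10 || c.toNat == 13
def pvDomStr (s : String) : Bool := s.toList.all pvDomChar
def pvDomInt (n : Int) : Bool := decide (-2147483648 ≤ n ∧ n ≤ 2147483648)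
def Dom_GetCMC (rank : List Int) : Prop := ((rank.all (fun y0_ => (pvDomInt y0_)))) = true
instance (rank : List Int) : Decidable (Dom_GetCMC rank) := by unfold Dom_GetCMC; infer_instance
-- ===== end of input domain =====

-- B replaces A's quadratic nested count loop by sorting once and sweeping one pointer
-- across the sorted list as the threshold grows (objective: faster, O(n log n) vs O(n^2)).

-- ===== PORT A =====
-- literal port of A: for i in range(n): count = 0; for j in range(n): if rank[j] <= i+1: count += 1; cmc.append(count)
def GetCMC (rank : List Int) : List Int :=
  (PySem.List.pyRange 0 (rank.length : Int)).foldl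
    (fun cmc i =>
      cmc ++ [(PySem.List.pyRange 0 (rank.length : Int)).foldl
        (fun count j => if PySem.List.pyGetD rank j 0 ≤ i + 1 then count + 1 else count)
        (0 : Int)])
    []

-- ===== PORT B =====
-- the inner 'while p < n and s[p] <= t: p += 1' of Source B
def pvAdvance (s : List Int) (t : Int) (p : Nat) : Nat :=
  if h : p < s.length then
    if s[p] ≤ t then pvAdvance s t (p + 1) else p
  else p
termination_by s.length - p

def GetCMC_alt (rank : List Int) : List Int :=
  let s := PySem.List.sorted rank (fun x => x)
  let n := rank.length
  ((PySem.List.pyRange 1 ((n : Int) + 1)).foldl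
    (fun st t =>
      let p := pvAdvance s t st.1
      (p, st.2 ++ [(p : Int)]))
    ((0 : Nat), ([] : List Int))).2

-- ===== PRECONDITION & SPEC =====
def Spec_GetCMC (rank : List Int) (out : List Int) : Prop := out = GetCMC_alt rank
instance (rank : List Int) (out : List Int) : Decidable (Spec_GetCMC rank out) := by unfold Spec_GetCMC; infer_instance

-- ===== CLAIM (what is proved, stated in full; the proofs are below) =====
def Claim_equal_GetCMC : Prop := ∀ (rank : List Int), Dom_GetCMC rank → Spec_GetCMC rank (GetCMC rank)

-- ===== LEMMAS AND PROOFS =====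

-- length of the prefix of s that is ≤ t
def pvL (s : List Int) (t : Int) : Nat := (s.takeWhile (fun r => decide (r ≤ t))).length

theorem pvL_le_length (s : List Int) (t : Int) : pvL s t ≤ s.length :=
  (List.takeWhile_prefix _).length_le

theorem pvL_elem (s : List Int) (t : Int) (i : Nat) (hi : i < pvL s t) :
    s[i]'(lt_of_lt_of_le hi (pvL_le_length s t)) ≤ t := by
  have h := (List.takeWhile_prefix (l := s) (fun r => decide (r ≤ t))).getElem (i := i) hi
  have hm := List.mem_takeWhile_imp (List.getElem_mem hi)
  rw [h] at hm
  simpa using hm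

theorem pvL_boundary (s : List Int) (t : Int) (h : pvL s t < s.length) :
    ¬ (s[pvL s t] ≤ t) := by
  have hsplit : s.takeWhile (fun r => decide (r ≤ t)) ++ s.dropWhile (fun r => decide (r ≤ t)) = s :=
    List.takeWhile_append_dropWhile
  have hne : s.dropWhile (fun r => decide (r ≤ t)) ≠ [] := by
    intro hnil
    rw [hnil, List.append_nil] at hsplit
    have := congrArg List.length hsplit
    simp [pvL] at h
    omega
  have hhead := List.head_dropWhile_not (fun r => decide (r ≤ t)) hne
  have hg : s[pvL s t] = (s.dropWhile (fun r => decide (r ≤ t))).head hne := by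
    have h2 : pvL s t < (s.takeWhile (fun r => decide (r ≤ t)) ++ s.dropWhile (fun r => decide (r ≤ t))).length := by
      rw [hsplit]; exact h
    have := List.getElem_of_eq hsplit.symm h
    rw [this, List.getElem_append]
    simp [pvL, List.head_eq_getElem]
  rw [hg]
  simpa using hhead

theorem pvAdvance_eq (s : List Int) (t : Int) (p : Nat) (hp : p ≤ pvL s t) :
    pvAdvance s t p = pvL s t := by
  induction hk : pvL s t - p generalizing p with
  | zero =>
    have hpe : p = pvL s t := by omega
    subst hpe
    unfold pvAdvance
    split
    · rw [if_neg (pvL_boundary s t (by assumption))]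
    · rfl
  | succ k ih =>
    have hlt : p < pvL s t := by omega
    have hlen : p < s.length := lt_of_lt_of_le hlt (pvL_le_length s t)
    unfold pvAdvance
    rw [dif_pos hlen, if_pos (pvL_elem s t p hlt)]
    exact ih (p + 1) (by omega) (by omega)

theorem pvL_countP (s : List Int) (t : Int) (hs : s.Pairwise (· ≤ ·)) :
    s.countP (fun r => decide (r ≤ t)) = pvL s t := by
  induction s with
  | nil => simp [pvL]
  | cons a l ih =>
    rcases List.pairwise_cons.mp hs with ⟨ha, hl⟩
    simp only [pvL] at *
    by_cases hat : a ≤ t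
    · rw [List.countP_cons, List.takeWhile_cons_of_pos (by simpa using hat),
        List.length_cons, ih hl]
      simp [hat]
    · have hz : l.countP (fun r => decide (r ≤ t)) = 0 := by
        rw [List.countP_eq_zero]
        intro x hx
        simp only [decide_eq_true_eq]
        intro hxt
        exact hat (le_trans (ha x hx) hxt)
      rw [List.countP_cons, List.takeWhile_cons_of_neg (by simpa using hat), hz]
      simp [hat]

theorem pvL_mono (s : List Int) (t t' : Int) (h : t ≤ t') : pvL s t ≤ pvL s t' := by
  induction s with
  | nil => simp [pvL]
  | cons a l ih =>
    simp only [pvL] at *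
    by_cases hat : a ≤ t
    · rw [List.takeWhile_cons_of_pos (by simpa using hat),
        List.takeWhile_cons_of_pos (by simpa using le_trans hat h)]
      simpa using ih
    · rw [List.takeWhile_cons_of_neg (by simpa using hat)]
      exact Nat.zero_le _

theorem pvLoop_eq (s : List Int) (m : Nat) :
    (PySem.List.pyRange 1 ((m : Int) + 1)).foldl
      (fun (st : Nat × List Int) t =>
        let p := pvAdvance s t st.1
        (p, st.2 ++ [(p : Int)]))
      ((0 : Nat), ([] : List Int)) =
    ((if m = 0 then 0 else pvL s (m : Int)),
      (List.range m).map (fun k : Nat => ((pvL s ((k : Int) + 1) : Nat) : Int))) := by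
  induction m with
  | zero => simp [PySem.List.pyRange]
  | succ m ih =>
    have hstep : PySem.List.pyRange 1 (((m + 1 : Nat) : Int) + 1) =
        PySem.List.pyRange 1 ((m : Int) + 1) ++ [(m : Int) + 1] := by
      push_cast
      exact PySem.List.pyRange_one_succ_right (by omega)
    rw [hstep, List.foldl_append, ih]
    have hadv : pvAdvance s ((m : Int) + 1) (if m = 0 then 0 else pvL s (m : Int)) =
        pvL s ((m : Int) + 1) := by
      by_cases hm : m = 0
      · rw [if_pos hm]; exact pvAdvance_eq s _ 0 (Nat.zero_le _)
      · rw [if_neg hm]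
        exact pvAdvance_eq s _ _ (pvL_mono s _ _ (by omega))
    simp only [List.foldl_cons, List.foldl_nil, hadv, List.range_succ]
    simp

theorem pvInner_eq (rank : List Int) (c : Int) :
    (PySem.List.pyRange 0 (rank.length : Int)).foldl
      (fun count j => if PySem.List.pyGetD rank j 0 ≤ c then count + 1 else count) (0 : Int) =
    ((rank.countP (fun r => decide (r ≤ c)) : Nat) : Int) := by
  rw [PySem.List.foldl_pyRange_zero_pyGetD' rank 0
      (fun count r => if r ≤ c then count + 1 else count) 0,
    PySem.List.foldl_ite_add_one (fun r => r ≤ c) rank 0]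
  ring

theorem GetCMC_eq_countP (rank : List Int) :
    GetCMC rank = (List.range rank.length).map
      (fun k : Nat => ((rank.countP (fun r => decide (r ≤ (k : Int) + 1)) : Nat) : Int)) := by
  unfold GetCMC
  rw [PySem.List.foldl_append_singleton_eq_map, List.nil_append]
  simp only [pvInner_eq]
  rw [PySem.List.pyRange_zero_natCast, List.map_map]
  apply List.map_congr_left
  intro k _
  simp

theorem GetCMC_alt_eq_countP (rank : List Int) :
    GetCMC_alt rank = (List.range rank.length).map
      (fun k : Nat => ((rank.countP (fun r => decide (r ≤ (k : Int) + 1)) : Nat) : Int)) := by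
  simp only [GetCMC_alt]
  rw [pvLoop_eq (PySem.List.sorted rank (fun x => x)) rank.length]
  dsimp only
  apply List.map_congr_left
  intro k _
  have hperm : (PySem.List.sorted rank (fun x => x)).Perm rank :=
    PySem.List.sorted_perm rank (fun x => x) false
  rw [← pvL_countP _ _ (by simpa using PySem.List.sorted_pairwise rank (fun x => x)),
    hperm.countP_eq]

-- ===== VERDICT (by name: the statement is the Claim_ definition above) =====
theorem GetCMC_spec : Claim_equal_GetCMC := by
  intro rank _
  unfold Spec_GetCMC
  rw [GetCMC_eq_countP, GetCMC_alt_eq_countP]
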